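-- pv_equiv track=rewrite | github.com/Salah856/LEETCODE | decodeString.py | find
-- ===== SOURCE A (Python) =====
-- def find(s):
--
--     back = s.index(']')
--     front = 0
--
--     for i in range(back, 0, -1):
--         if s[i] == '[':
--             front = i
--             break
--
--     return front
-- ===== SOURCE B (Python) =====
-- def find(s):
--     last = 0
--     for i, c in enumerate(s):
--         if c == '[':
--             last = i
--         elif c == ']':
--             return last
--     raise ValueError('substring not found')
-- ===== Notes on version B (the rewrite author's own statement) =====
-- stated objective: alternative
-- what changed: Replaced the index(']') call plus backward scan for '[' by a single forward pass that maintains the last-seen '[' index and returns it at the first ']' (raising the same ValueError if no ']' exists).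
import Mathlib
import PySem

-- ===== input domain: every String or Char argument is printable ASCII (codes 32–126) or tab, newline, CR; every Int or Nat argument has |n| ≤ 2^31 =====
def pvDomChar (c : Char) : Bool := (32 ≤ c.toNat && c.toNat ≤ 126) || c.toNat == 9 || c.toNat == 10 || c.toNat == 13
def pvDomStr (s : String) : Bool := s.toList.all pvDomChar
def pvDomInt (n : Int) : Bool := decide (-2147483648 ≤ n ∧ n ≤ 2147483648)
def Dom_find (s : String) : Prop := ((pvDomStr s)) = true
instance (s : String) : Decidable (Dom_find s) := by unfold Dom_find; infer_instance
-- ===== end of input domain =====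

-- B replaces A's index(']') call plus backward scan with one forward pass keeping the last '[' index (alternative decomposition, same complexity).
-- Both A and B raise ValueError when s contains no ']'; those inputs are outside Pre_find.

-- ===== PORT A =====
-- the for-loop 'for i in range(back, 0, -1): if s[i] == "[": front = i; break'
-- (s[i] is always in range here since the range indices lie in [1, back] and back < len(s),
--  so pyGetD is exact)
def findLoopA (cs : List Char) (l : List Int) (front : Int) : Int :=
  match l with
  | [] => front
  | i :: rest => if PySem.List.pyGetD cs i ' ' = '[' then i else findLoopA cs rest front

def find (s : String) : Int :=
  let back := PySem.Str.find s "]"   -- s.index(']'); raises when "]" absent → excluded by Pre_find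
  findLoopA s.toList (PySem.List.pyRange back 0 (-1)) 0

-- ===== PORT B =====
-- 'for i, c in enumerate(s): if c == "[": last = i; elif c == "]": return last'
-- (the [] case corresponds to B's raise ValueError, unreachable under Pre_find)
def findLoopB (cs : List Char) (i : Int) (last : Int) : Int :=
  match cs with
  | [] => last
  | c :: rest =>
      if c = '[' then findLoopB rest (i + 1) i
      else if c = ']' then last
      else findLoopB rest (i + 1) last

def find_alt (s : String) : Int := findLoopB s.toList 0 0

-- ===== PRECONDITION & SPEC =====
-- Pre_find: s must contain ']'; otherwise both A (s.index) and B raise ValueError.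
def Pre_find (s : String) : Prop := PySem.Str.isIn "]" s = true
instance (s : String) : Decidable (Pre_find s) := by unfold Pre_find; infer_instance
def pvWitness_find : String := "a[b]c"

def Spec_find (s : String) (out : Int) : Prop := out = find_alt s
instance (s : String) (out : Int) : Decidable (Spec_find s out) := by unfold Spec_find; infer_instance

-- ===== CLAIM (what is proved, stated in full; the proofs are below) =====
def Claim_equal_find : Prop := ∀ (s : String), Dom_find s → Pre_find s → Spec_find s (find s)

-- ===== LEMMAS AND PROOFS =====

-- forward accumulator: value of 'last' after scanning a prefix containing no ']'
def pvLastB : List Char → Int → Int → Int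
  | [], _, last => last
  | c :: r, i, last => pvLastB r (i + 1) (if c = '[' then i else last)

-- backward scan with explicit fuel: first index in k, k-1, …, 1 holding '[' (else 0)
def pvR (cs : List Char) : Nat → Int
  | 0 => 0
  | k + 1 => if cs.getD (k + 1) ' ' = '[' then ((k : Int) + 1) else pvR cs k

theorem pvLoopB_eq (pre : List Char) : ∀ (post : List Char) (i last : Int),
    ']' ∉ pre → findLoopB (pre ++ ']' :: post) i last = pvLastB pre i last := by
  induction pre with
  | nil => intro post i last _; simp [findLoopB, pvLastB]
  | cons c r ih =>
      intro post i last h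
      have hc : c ≠ ']' := fun hc => h (hc ▸ List.mem_cons_self)
      have hr : ']' ∉ r := fun hm => h (List.mem_cons_of_mem _ hm)
      by_cases hb : c = '['
      · simp [findLoopB, pvLastB, hb, ih post _ _ hr]
      · simp [findLoopB, pvLastB, hb, hc, ih post _ _ hr]

theorem pvLastB_snoc (xs : List Char) : ∀ (c : Char) (i last : Int),
    pvLastB (xs ++ [c]) i last = if c = '[' then i + xs.length else pvLastB xs i last := by
  induction xs with
  | nil => intro c i last; simp [pvLastB]
  | cons d r ih =>
      intro c i last
      simp only [List.cons_append, pvLastB, ih]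
      by_cases hb : c = '['
      · subst hb; simp only [List.length_cons]; push_cast; omega
      · simp [hb]

theorem pvLoopA_eq (cs : List Char) : ∀ (k : Nat),
    findLoopA cs (PySem.List.pyRange (k : Int) 0 (-1)) 0 = pvR cs k := by
  intro k
  induction k with
  | zero => rw [PySem.List.pyRange_neg_one_eq_nil (by omega)]; simp [findLoopA, pvR]
  | succ k ih =>
      rw [PySem.List.pyRange_neg_one_cons (by push_cast; omega)]
      have h1 : ((k + 1 : Nat) : Int) - 1 = (k : Int) := by push_cast; omega
      simp only [findLoopA, h1, ih]
      rw [PySem.List.pyGetD_natCast]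
      by_cases hb : cs.getD (k + 1) ' ' = '['
      · simp [pvR]
      · simp [pvR]

theorem pvR_append (xs ys : List Char) : ∀ (k : Nat), k < xs.length →
    pvR (xs ++ ys) k = pvR xs k := by
  intro k
  induction k with
  | zero => intro _; simp [pvR]
  | succ k ih =>
      intro hk
      have hg : (xs ++ ys).getD (k + 1) ' ' = xs.getD (k + 1) ' ' := by
        simp [List.getD, List.getElem?_append_left hk]
      simp only [pvR, hg, ih (by omega)]

theorem pvR_eq_lastB (pre : List Char) :
    pvR pre (pre.length - 1) = pvLastB pre 0 0 := by
  induction pre using List.reverseRecOn with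
  | nil => simp [pvR, pvLastB]
  | append_singleton xs c ih =>
      rw [pvLastB_snoc]
      rcases xs with _ | ⟨d, r⟩
      · simp [pvR, pvLastB]
      · have hlen : ((d :: r) ++ [c]).length - 1 = r.length + 1 := by simp
        rw [hlen]
        have hg : ((d :: r) ++ [c]).getD (r.length + 1) ' ' = c := by
          simp [List.getD]
        simp only [pvR, hg]
        by_cases hb : c = '['
        · simp [hb]
        · have hlt : r.length < (d :: r).length := by simp
          rw [if_neg hb, if_neg hb, pvR_append _ _ _ hlt]
          have : (d :: r).length - 1 = r.length := by simp
          rw [← this, ih]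

-- singleton prefix of a drop ↔ getElem?
theorem pvSingle_prefix_drop (l : List Char) (i : Nat) (c : Char) :
    [c] <+: l.drop i ↔ l[i]? = some c := by
  constructor
  · rintro ⟨t, ht⟩
    have h0 : (l.drop i)[0]? = some c := by rw [← ht]; simp
    simpa using h0
  · intro h
    obtain ⟨hi, hc⟩ := List.getElem?_eq_some_iff.1 h
    refine ⟨l.drop (i + 1), ?_⟩
    rw [List.drop_eq_getElem_cons hi]
    simp [hc]

theorem pvFind_eq (pre post : List Char) (h : ']' ∉ pre) :
    PySem.Chars.find (pre ++ ']' :: post) [']'] = (pre.length : Int) := by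
  have hocc : [']'] <+: (pre ++ ']' :: post).drop pre.length := by
    rw [pvSingle_prefix_drop]
    simp
  have hinf : [']'] <:+: (pre ++ ']' :: post) := ⟨pre, post, by simp⟩
  have hnn : 0 ≤ PySem.Chars.find (pre ++ ']' :: post) [']'] :=
    (PySem.Chars.find_nonneg_iff _ [']']).2 hinf
  obtain ⟨hpref, hmin⟩ := PySem.Chars.find_spec (s := pre ++ ']' :: post) (sub := [']']) hnn
  have hle : (PySem.Chars.find (pre ++ ']' :: post) [']']).toNat ≤ pre.length := by
    by_contra hgt
    exact (hmin pre.length (by omega)) hocc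
  have hge : pre.length ≤ (PySem.Chars.find (pre ++ ']' :: post) [']']).toNat := by
    by_contra hlt
    have hidx : (pre ++ ']' :: post)[(PySem.Chars.find (pre ++ ']' :: post) [']']).toNat]? = some ']' :=
      (pvSingle_prefix_drop _ _ _).1 hpref
    rw [List.getElem?_append_left (by omega)] at hidx
    exact h (List.mem_of_getElem? hidx)
  omega

-- first-occurrence split of a list containing ']'
theorem pvSplit (cs : List Char) (h : ']' ∈ cs) :
    ∃ pre post, cs = pre ++ ']' :: post ∧ ']' ∉ pre := by
  induction cs with
  | nil => cases h
  | cons c r ih =>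
      by_cases hc : c = ']'
      · exact ⟨[], r, by simp [hc], by simp⟩
      · obtain ⟨pre, post, h1, h2⟩ := ih (by rcases List.mem_cons.1 h with h | h
                                             · exact absurd h.symm hc
                                             · exact h)
        exact ⟨c :: pre, post, by simp [h1], by
          intro hm
          rcases List.mem_cons.1 hm with hm | hm
          · exact hc hm.symm
          · exact h2 hm⟩

-- ===== VERDICT (by name: the statement is the Claim_ definition above) =====
theorem find_spec : Claim_equal_find := by
  intro s _ hpre
  unfold Spec_find
  have hmem : ']' ∈ s.toList := by
    have : ("]".toList) <:+: s.toList := by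
      have := PySem.Str.isIn_iff_infix (sub := "]") (s := s)
      exact this.1 hpre
    obtain ⟨u, v, huv⟩ := this
    rw [← huv]; simp
  obtain ⟨pre, post, hsplit, hnot⟩ := pvSplit s.toList hmem
  unfold find find_alt
  have hfind : PySem.Str.find s "]" = (pre.length : Int) := by
    have : PySem.Str.find s "]" = PySem.Chars.find s.toList "]".toList := by simp
    rw [this, hsplit]
    simpa using pvFind_eq pre post hnot
  rw [hfind, hsplit, pvLoopA_eq, pvLoopB_eq pre post 0 0 hnot]
  -- reduce pvR (pre ++ ']' :: post) pre.length to pvR pre (pre.length - 1)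
  rcases hn : pre.length with _ | m
  · have hpre0 : pre = [] := List.length_eq_zero_iff.1 hn
    simp [hpre0, pvR, pvLastB]
  · have hg : (pre ++ ']' :: post).getD (m + 1) ' ' = ']' := by
      simp [List.getD, hn]
    simp only [pvR, hg]
    rw [if_neg (by decide)]
    rw [pvR_append _ _ m (by omega)]
    have : pre.length - 1 = m := by omega
    rw [← this, pvR_eq_lastB]
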